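-- pv_equiv track=rewrite | github.com/modularizer/plat | python/plat/cli_main.py | strip_first_positional
-- ===== SOURCE A (Python) =====
-- def strip_first_positional(args: list[str], value_flags: set[str]) -> list[str]:
--     out: list[str] = []
--     removed = False
--     skip_next = False
--     for arg in args:
--         if skip_next:
--             out.append(arg)
--             skip_next = False
--             continue
--         if arg in value_flags:
--             out.append(arg)
--             skip_next = True
--             continue
--         if not arg.startswith("--") and not removed:
--             removed = True
--             continue
--         out.append(arg)
--     return out
-- ===== SOURCE B (Python) =====
-- def strip_first_positional(args: list[str], value_flags: set[str]) -> list[str]: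
--     # Locate the index of the first positional argument, then splice it out.
--     idx = None
--     skip_next = False
--     for i, arg in enumerate(args):
--         if skip_next:
--             skip_next = False
--             continue
--         if arg in value_flags:
--             skip_next = True
--             continue
--         if not arg.startswith("--"):
--             idx = i
--             break
--     if idx is None:
--         return list(args)
--     return args[:idx] + args[idx + 1:]
-- ===== Notes on version B (the rewrite author's own statement) =====
-- stated objective: simpler
-- what changed: B first locates the index of the first positional (same skip-next/value-flag logic), breaking immediately, then returns the list with that single index spliced out (args[:idx]+args[idx+1:]) instead of rebuilding the whole output with a 'removed' flag in one pass.
import Mathlib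
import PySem

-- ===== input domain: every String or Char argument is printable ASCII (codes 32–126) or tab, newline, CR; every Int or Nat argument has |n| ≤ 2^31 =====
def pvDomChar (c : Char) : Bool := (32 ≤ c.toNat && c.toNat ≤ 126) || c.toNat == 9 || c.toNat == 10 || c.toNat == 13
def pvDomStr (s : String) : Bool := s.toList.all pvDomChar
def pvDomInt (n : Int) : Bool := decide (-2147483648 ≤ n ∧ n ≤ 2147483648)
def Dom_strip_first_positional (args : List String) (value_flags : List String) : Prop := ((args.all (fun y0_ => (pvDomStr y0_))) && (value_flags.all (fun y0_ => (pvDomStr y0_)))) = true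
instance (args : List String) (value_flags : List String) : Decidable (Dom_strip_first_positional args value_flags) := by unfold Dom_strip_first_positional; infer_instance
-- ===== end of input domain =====

-- B locates the first positional's index and splices it out, instead of A's one-pass rebuild
-- with a 'removed' flag; same value-flag skip logic, same result (objective: simpler decomposition).

-- ===== PORT A =====
-- state = (out, removed, skip_next)
def pvStepA (value_flags : List String) (st : List String × Bool × Bool) (arg : String) :
    List String × Bool × Bool :=
  if st.2.2 then (st.1 ++ [arg], st.2.1, false)
  else if value_flags.contains arg then (st.1 ++ [arg], st.2.1, true)
  else if !(PySem.Str.startswith arg "--") && !st.2.1 then (st.1, true, st.2.2)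
  else (st.1 ++ [arg], st.2.1, st.2.2)

def strip_first_positional (args : List String) (value_flags : List String) : List String :=
  (args.foldl (pvStepA value_flags) ([], false, false)).1

-- ===== PORT B =====
-- first pass: index of the first positional (honouring skip_next), none if absent
def pvFindPosIdx (value_flags : List String) : List String → Nat → Bool → Option Nat
  | [], _, _ => none
  | arg :: rest, i, skip_next =>
    if skip_next then pvFindPosIdx value_flags rest (i + 1) false
    else if value_flags.contains arg then pvFindPosIdx value_flags rest (i + 1) true
    else if !(PySem.Str.startswith arg "--") then some i
    else pvFindPosIdx value_flags rest (i + 1) skip_next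

def strip_first_positional_alt (args : List String) (value_flags : List String) : List String :=
  match pvFindPosIdx value_flags args 0 false with
  | none => args
  -- args[:idx] ++ args[idx+1:]; exact Python slice semantics since idx ≥ 0
  | some idx => args.take idx ++ args.drop (idx + 1)

-- ===== PRECONDITION & SPEC =====
def Spec_strip_first_positional (args : List String) (value_flags : List String) (out : List String) : Prop := out = strip_first_positional_alt args value_flags
instance (args : List String) (value_flags : List String) (out : List String) : Decidable (Spec_strip_first_positional args value_flags out) := by unfold Spec_strip_first_positional; infer_instance

-- ===== CLAIM (what is proved, stated in full; the proofs are below) =====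
def Claim_equal_strip_first_positional : Prop := ∀ (args : List String) (value_flags : List String), Dom_strip_first_positional args value_flags → Spec_strip_first_positional args value_flags (strip_first_positional args value_flags)

-- ===== LEMMAS AND PROOFS =====

-- shifting the running index of B's locating pass
theorem pvFindPosIdx_shift (vf : List String) :
    ∀ (rest : List String) (i : Nat) (skip : Bool),
      pvFindPosIdx vf rest i skip = (pvFindPosIdx vf rest 0 skip).map (· + i) := by
  intro rest
  induction rest with
  | nil => intro i skip; simp [pvFindPosIdx]
  | cons a rest ih =>
    intro i skip
    simp only [pvFindPosIdx]
    split_ifs with h1 h2 h3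
    · rw [ih (i + 1), ih 1, Option.map_map]
      rcases pvFindPosIdx vf rest 0 false <;> simp <;> try omega
    · rw [ih (i + 1), ih 1, Option.map_map]
      cases pvFindPosIdx vf rest 0 true <;> simp <;> omega
    · simp
    · rw [ih (i + 1), ih 1, Option.map_map]
      cases pvFindPosIdx vf rest 0 skip <;> simp <;> omega

-- once A's 'removed' flag is set, A just copies the remainder
theorem pvA_removed (vf : List String) :
    ∀ (rest out : List String) (skip : Bool),
      (rest.foldl (pvStepA vf) (out, true, skip)).1 = out ++ rest := by
  intro rest
  induction rest with
  | nil => intro out skip; simp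
  | cons a rest ih =>
    intro out skip
    simp only [List.foldl_cons, pvStepA, Bool.not_true, Bool.and_false]
    split_ifs <;> simp_all

-- main invariant: A's fold (removed = false) equals B's locate-and-splice
theorem pvMain (vf : List String) :
    ∀ (rest out : List String) (skip : Bool),
      (rest.foldl (pvStepA vf) (out, false, skip)).1 =
        out ++ (match pvFindPosIdx vf rest 0 skip with
                | none => rest
                | some j => rest.take j ++ rest.drop (j + 1)) := by
  intro rest
  induction rest with
  | nil => intro out skip; simp [pvFindPosIdx]
  | cons a rest ih =>
    intro out skip
    simp only [List.foldl_cons, pvStepA, pvFindPosIdx, Bool.not_false, Bool.and_true]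
    split_ifs with h1 h2 h3
    · rw [ih, pvFindPosIdx_shift vf rest 1 false]
      cases pvFindPosIdx vf rest 0 false <;> simp
    · rw [ih, pvFindPosIdx_shift vf rest 1 true]
      cases pvFindPosIdx vf rest 0 true <;> simp
    · rw [pvA_removed]
      simp
    · rw [ih, pvFindPosIdx_shift vf rest 1 skip]
      cases pvFindPosIdx vf rest 0 skip <;> simp

-- ===== VERDICT (by name: the statement is the Claim_ definition above) =====
theorem strip_first_positional_spec : Claim_equal_strip_first_positional := by
  intro args vf _
  show strip_first_positional args vf = strip_first_positional_alt args vf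
  unfold strip_first_positional strip_first_positional_alt
  rw [pvMain vf args [] false]
  cases pvFindPosIdx vf args 0 false <;> simp
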